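-- pv_equiv track=rewrite | github.com/vincentiusmartin/QBiC-Pred | controller/utils.py | itoseq
-- ===== SOURCE A (Python) =====
-- def itoseq(seqint,kmer):
--     nucleotides = {0:'A',1:'C',2:'G',3:'T'}
--     binrep = 0
--     seq = ""
--     while(seqint > 0):
--         seq = nucleotides[seqint & 3] + seq
--         seqint >>= 2
--     while len(seq) < kmer:
--         seq = 'A' + seq
--     return seq
-- ===== SOURCE B (Python) =====
-- def itoseq(seqint, kmer):
--     nucleotides = ('A', 'C', 'G', 'T')
--     x = seqint if seqint > 0 else 0
--     digits = (x.bit_length() + 1) // 2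
--     L = max(kmer, digits)
--     return ''.join(nucleotides[(x >> (2 * (L - 1 - j))) & 3] for j in range(L))
-- ===== Notes on version B (the rewrite author's own statement) =====
-- stated objective: alternative
-- what changed: B precomputes the output length L = max(kmer, (bit_length+1)//2) and builds the string in a single forward most-significant-first pass with ''.join, instead of A's two while loops that consume the integer prepending one character at a time and then pad with repeated string prepending.
import Mathlib
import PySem

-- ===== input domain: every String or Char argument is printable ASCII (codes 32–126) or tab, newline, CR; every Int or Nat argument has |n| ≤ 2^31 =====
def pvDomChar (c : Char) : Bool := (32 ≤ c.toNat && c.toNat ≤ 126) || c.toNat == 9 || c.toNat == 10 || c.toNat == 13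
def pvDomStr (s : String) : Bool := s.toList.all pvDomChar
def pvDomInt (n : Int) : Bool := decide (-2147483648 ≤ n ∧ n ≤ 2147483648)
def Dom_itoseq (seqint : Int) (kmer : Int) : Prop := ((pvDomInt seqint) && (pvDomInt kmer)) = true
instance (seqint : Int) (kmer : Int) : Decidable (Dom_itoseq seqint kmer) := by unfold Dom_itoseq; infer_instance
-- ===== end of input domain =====

-- B precomputes the output length from bit_length and builds the string in one
-- forward most-significant-first pass instead of A's char-by-char prepending; objective: alternative decomposition.

-- ===== PORT A =====
-- A's while loop, consuming seqint two bits at a time and prepending.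
-- 'seqint >>= 2' is Lean's arithmetic '>>> 2'; 'seqint & 3' is PySem.Int.band;
-- the dict key is always 0..3, so the .getD default 'A' is never used.
def itoseqLoop (seqint : Int) (seq : List Char) : List Char :=
  if 0 < seqint then
    itoseqLoop (seqint >>> (2 : Nat))
      (((PySem.Dict.ofList [((0 : Int), 'A'), (1, 'C'), (2, 'G'), (3, 'T')]).get?
          (PySem.Int.band seqint 3)).getD 'A' :: seq)
  else seq
termination_by seqint.toNat
decreasing_by rw [Int.shiftRight_eq_div_pow]; omega

-- A's padding loop: while len(seq) < kmer: seq = 'A' + seq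
def itoseqPad (kmer : Int) (seq : List Char) : List Char :=
  if (seq.length : Int) < kmer then itoseqPad kmer ('A' :: seq) else seq
termination_by (kmer - seq.length).toNat
decreasing_by simp at *; omega

def itoseq (seqint : Int) (kmer : Int) : String :=
  String.ofList (itoseqPad kmer (itoseqLoop seqint []))

-- ===== PORT B =====
-- Literal transliteration of Source B: 'x >> (2*(L-1-j))' is '>>> (…).toNat'
-- (the shift amount is nonnegative for j in range(L)); 'nucleotides[idx]' with
-- idx always 0..3 is pyGetD; '(x.bit_length()+1)//2' is PySem.Int.bitLength + floordiv.
def itoseq_alt (seqint : Int) (kmer : Int) : String :=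
  let x : Int := if 0 < seqint then seqint else 0
  let digits : Int := PySem.Int.floordiv ((PySem.Int.bitLength x : Int) + 1) 2
  let L : Int := max kmer digits
  String.ofList ((PySem.List.pyRange 0 L 1).map (fun j =>
    PySem.List.pyGetD ['A', 'C', 'G', 'T']
      (PySem.Int.band (x >>> (2 * (L - 1 - j)).toNat) 3) 'A'))

-- ===== PRECONDITION & SPEC =====
def Spec_itoseq (seqint : Int) (kmer : Int) (out : String) : Prop := out = itoseq_alt seqint kmer
instance (seqint : Int) (kmer : Int) (out : String) : Decidable (Spec_itoseq seqint kmer out) := by unfold Spec_itoseq; infer_instance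

-- ===== CLAIM (what is proved, stated in full; the proofs are below) =====
def Claim_equal_itoseq : Prop := ∀ (seqint : Int) (kmer : Int), Dom_itoseq seqint kmer → Spec_itoseq seqint kmer (itoseq seqint kmer)

-- ===== LEMMAS AND PROOFS =====

-- nucleotide character for a base-4 digit
def ncChar (k : Nat) : Char :=
  if k = 0 then 'A' else if k = 1 then 'C' else if k = 2 then 'G' else 'T'

-- canonical base-4 digit string of n (MSB first, empty for 0)
def gN (n : Nat) : List Char :=
  if n = 0 then [] else gN (n / 4) ++ [ncChar (n % 4)]
termination_by n
decreasing_by omega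

theorem itoseqLoop_eq (i : Int) (acc : List Char) :
    itoseqLoop i acc = gN i.toNat ++ acc := by
  by_cases h : 0 < i
  · have hsh : (i >>> (2 : Nat)).toNat = i.toNat / 4 := by
      rw [Int.shiftRight_eq_div_pow]; omega
    have hband : PySem.Int.band i 3 = ((i.toNat % 4 : Nat) : Int) := by
      have : i = ((i.toNat : Nat) : Int) := by omega
      rw [this, show ((3:Int) = ((3:Nat):Int)) from rfl, PySem.Int.band_natCast]
      rw [Nat.and_two_pow_sub_one_eq_mod i.toNat 2]; norm_num
    have hchar :
        ((PySem.Dict.ofList [((0 : Int), 'A'), (1, 'C'), (2, 'G'), (3, 'T')]).get?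
          (PySem.Int.band i 3)).getD 'A' = ncChar (i.toNat % 4) := by
      rw [hband]
      have h4 : i.toNat % 4 < 4 := Nat.mod_lt _ (by norm_num)
      interval_cases (i.toNat % 4) <;> decide
    rw [itoseqLoop, if_pos h, itoseqLoop_eq (i >>> (2 : Nat)), hsh, hchar]
    have hne : i.toNat ≠ 0 := by omega
    have hgn : gN i.toNat = gN (i.toNat / 4) ++ [ncChar (i.toNat % 4)] := by
      rw [gN]; rw [if_neg hne]
    rw [hgn, List.append_assoc, List.singleton_append]
  · rw [itoseqLoop, if_neg h]
    have : i.toNat = 0 := by omega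
    rw [this, gN]; simp
termination_by i.toNat
decreasing_by rw [Int.shiftRight_eq_div_pow]; omega

theorem itoseqPad_eq (kmer : Int) (seq : List Char) :
    itoseqPad kmer seq = List.replicate (kmer.toNat - seq.length) 'A' ++ seq := by
  by_cases h : (seq.length : Int) < kmer
  · rw [itoseqPad, if_pos h, itoseqPad_eq kmer ('A' :: seq)]
    have hk : kmer.toNat - seq.length = (kmer.toNat - ('A' :: seq).length) + 1 := by
      simp; omega
    rw [hk, List.replicate_succ', List.append_assoc, List.singleton_append]
  · rw [itoseqPad, if_neg h]
    have : kmer.toNat - seq.length = 0 := by omega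
    rw [this]; simp
termination_by (kmer - seq.length).toNat
decreasing_by simp at *; omega

theorem gN_lt (n : Nat) : n < 4 ^ (gN n).length := by
  rw [gN]
  by_cases h : n = 0
  · simp [h]
  · rw [if_neg h]
    have ih := gN_lt (n / 4)
    simp only [List.length_append, List.length_singleton, pow_succ]
    omega
termination_by n
decreasing_by omega

theorem gN_len (n : Nat) :
    (gN n).length = (PySem.Int.bitLength (n : Int) + 1) / 2 := by
  by_cases h0 : n = 0
  · subst h0; rw [gN]; simp [PySem.Int.bitLength_zero]
  by_cases h4 : n < 4
  · have h1 : 1 ≤ n := by omega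
    interval_cases n <;> simp [gN, ncChar] <;> decide
  · have hb1 : PySem.Int.bitLength ((n : Nat) : Int) =
        PySem.Int.bitLength ((n / 2 : Nat) : Int) + 1 :=
      PySem.Int.bitLength_natCast (show 0 < n by omega)
    have hb2 : PySem.Int.bitLength ((n / 2 : Nat) : Int) =
        PySem.Int.bitLength ((n / 2 / 2 : Nat) : Int) + 1 :=
      PySem.Int.bitLength_natCast (show 0 < n / 2 by omega)
    have hdd : n / 2 / 2 = n / 4 := by omega
    have ih := gN_len (n / 4)
    rw [gN, if_neg h0]
    simp only [List.length_append, List.length_singleton]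
    rw [ih, hb1, hb2, hdd]
    omega
termination_by n
decreasing_by omega

theorem mapForm (L : Nat) : ∀ n : Nat, n < 4 ^ L →
    (List.range L).map (fun j => ncChar (n / 4 ^ (L - 1 - j) % 4)) =
      List.replicate (L - (gN n).length) 'A' ++ gN n := by
  induction L with
  | zero =>
    intro n hn
    have : n = 0 := by omega
    subst this
    rw [gN]; simp
  | succ L ih =>
    intro n hn
    rw [List.range_succ, List.map_append]
    have hcong : (List.range L).map (fun j => ncChar (n / 4 ^ (L + 1 - 1 - j) % 4)) =
        (List.range L).map (fun j => ncChar ((n / 4) / 4 ^ (L - 1 - j) % 4)) := by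
      apply List.map_congr_left
      intro j hj
      rw [List.mem_range] at hj
      have he : L + 1 - 1 - j = (L - 1 - j) + 1 := by omega
      rw [he, pow_succ, Nat.mul_comm, ← Nat.div_div_eq_div_mul]
    have hlast : ncChar (n / 4 ^ (L + 1 - 1 - L) % 4) = ncChar (n % 4) := by
      have : L + 1 - 1 - L = 0 := by omega
      rw [this]; simp
    have hdiv : n / 4 < 4 ^ L := by
      have : (4:Nat) ^ (L + 1) = 4 ^ L * 4 := pow_succ 4 L
      omega
    rw [List.map_singleton, hlast, hcong, ih (n / 4) hdiv]
    by_cases h0 : n = 0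
    · subst h0
      simp [gN, ncChar, ← List.replicate_succ']
    · have hgn : gN n = gN (n / 4) ++ [ncChar (n % 4)] := by
        rw [gN]; rw [if_neg h0]
      rw [hgn]
      simp only [List.length_append, List.length_singleton]
      have : L + 1 - ((gN (n / 4)).length + 1) = L - (gN (n / 4)).length := by omega
      rw [this, List.append_assoc]

theorem itoseq_spec : Claim_equal_itoseq := by
  unfold Claim_equal_itoseq Spec_itoseq
  intro seqint kmer _
  -- normalise both sides to the canonical padded digit string
  set n : Nat := seqint.toNat with hn
  -- A side
  have hA : itoseq seqint kmer =
      String.ofList (List.replicate (kmer.toNat - (gN n).length) 'A' ++ gN n) := by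
    rw [itoseq, itoseqLoop_eq, List.append_nil, itoseqPad_eq]
  -- B side
  have hx : (if 0 < seqint then seqint else 0) = ((n : Nat) : Int) := by
    split <;> omega
  have hlen := gN_len n
  have hdig : PySem.Int.floordiv ((PySem.Int.bitLength ((n : Nat) : Int) : Int) + 1) 2 =
      (((gN n).length : Nat) : Int) := by
    rw [show ((PySem.Int.bitLength ((n : Nat) : Int) : Int) + 1) =
        (((PySem.Int.bitLength ((n : Nat) : Int) + 1 : Nat) : Nat) : Int) by push_cast; ring]
    rw [show ((2:Int) = ((2:Nat):Int)) from rfl, PySem.Int.floordiv_natCast]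
    rw [hlen]
  set l : Nat := (gN n).length with hl
  have hB : itoseq_alt seqint kmer =
      String.ofList ((PySem.List.pyRange 0 (max kmer (l : Int)) 1).map (fun j =>
        PySem.List.pyGetD ['A', 'C', 'G', 'T']
          (PySem.Int.band (((n : Nat) : Int) >>> (2 * (max kmer (l : Int) - 1 - j)).toNat) 3) 'A')) := by
    rw [itoseq_alt]
    simp only [hx, hdig]
  rw [hA, hB]
  set L : Int := max kmer (l : Int) with hLdef
  have hL0 : 0 ≤ L := le_trans (by positivity) (le_max_right _ _)
  have hLl : l ≤ L.toNat := by
    have := le_max_right kmer (l : Int); omega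
  -- rewrite the pyRange map into the Nat-indexed canonical form
  have hrange : PySem.List.pyRange 0 L 1 = (List.range L.toNat).map (fun k : Nat => (k : Int)) := by
    rw [PySem.List.pyRange_one]; simp
  rw [hrange, List.map_map]
  have hmap : (List.range L.toNat).map
      ((fun j => PySem.List.pyGetD ['A', 'C', 'G', 'T']
          (PySem.Int.band (((n : Nat) : Int) >>> (2 * (L - 1 - j)).toNat) 3) 'A') ∘
        (fun k : Nat => (k : Int))) =
      (List.range L.toNat).map (fun k => ncChar (n / 4 ^ (L.toNat - 1 - k) % 4)) := by
    apply List.map_congr_left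
    intro k hk
    rw [List.mem_range] at hk
    simp only [Function.comp_apply]
    have hm : (2 * (L - 1 - (k : Int))).toNat = 2 * (L.toNat - 1 - k) := by omega
    rw [hm]
    have hshift : (((n : Nat) : Int) >>> (2 * (L.toNat - 1 - k))) =
        ((n / 4 ^ (L.toNat - 1 - k) : Nat) : Int) := by
      rw [Int.shiftRight_eq_div_pow, ← Int.natCast_div]
      norm_num [Nat.pow_mul]
    rw [hshift, show ((3:Int) = ((3:Nat):Int)) from rfl, PySem.Int.band_natCast]
    rw [Nat.and_two_pow_sub_one_eq_mod _ 2]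
    have hd4 : n / 4 ^ (L.toNat - 1 - k) % 4 < 4 := Nat.mod_lt _ (by norm_num)
    set d : Nat := n / 4 ^ (L.toNat - 1 - k) % 4 with hd
    interval_cases d <;> decide
  rw [hmap]
  have hbound : n < 4 ^ L.toNat :=
    lt_of_lt_of_le (gN_lt n) (Nat.pow_le_pow_right (by norm_num) hLl)
  rw [mapForm L.toNat n hbound, ← hl]
  have hfin : kmer.toNat - l = L.toNat - l := by
    rcases le_total kmer ((l : Nat) : Int) with hc | hc
    · have : L = ((l : Nat) : Int) := by rw [hLdef, max_eq_right hc]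
      omega
    · have : L = kmer := by rw [hLdef, max_eq_left hc]
      omega
  rw [hfin]
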